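-- pv_equiv track=rewrite | github.com/iPupkin/Algorithms | PS0.py | findNonAnagrams
-- ===== SOURCE A (Python) =====
-- def findNonAnagrams(words, numWords):
--     not_anagrams = 0
--
--     for word in range(numWords): # loop through list
--         for otherWord in range(numWords): # compare to rest of list
--             if (word != otherWord): # dont compare to itself
--                 # check if words do not match
--                 if (words[word] != words[otherWord]):
--                     not_anagrams += 1
--
--
--     return not_anagrams
-- ===== SOURCE B (Python) =====
-- def findNonAnagrams(words, numWords):
--     counts = {}
--     n = 0
--     for w in words[:max(numWords, 0)]:
--         counts[w] = counts.get(w, 0) + 1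
--         n += 1
--     return n * (n - 1) - sum(c * (c - 1) for c in counts.values())
-- ===== Notes on version B (the rewrite author's own statement) =====
-- stated objective: faster
-- what changed: Replaced A's quadratic all-ordered-pairs comparison with a single counting pass over the first numWords words (a frequency dict) and the closed form n*(n-1) - sum c*(c-1) over the counts.
import Mathlib
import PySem

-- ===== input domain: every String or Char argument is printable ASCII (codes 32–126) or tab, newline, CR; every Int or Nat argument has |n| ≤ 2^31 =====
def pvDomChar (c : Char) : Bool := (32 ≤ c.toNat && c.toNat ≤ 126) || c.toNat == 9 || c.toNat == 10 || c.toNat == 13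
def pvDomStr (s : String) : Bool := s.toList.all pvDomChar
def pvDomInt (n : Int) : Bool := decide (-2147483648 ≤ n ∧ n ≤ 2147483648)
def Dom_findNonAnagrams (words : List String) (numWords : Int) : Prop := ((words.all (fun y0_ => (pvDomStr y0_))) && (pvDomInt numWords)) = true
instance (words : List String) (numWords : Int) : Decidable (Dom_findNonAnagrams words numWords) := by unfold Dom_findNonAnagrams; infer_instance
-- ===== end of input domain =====

-- B replaces A's quadratic all-pairs scan by one counting pass (a frequency dict) and the
-- closed form n*(n-1) - Σ c*(c-1); equivalence is proved on the return value (no mutation).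

-- ===== PORT A =====
def findNonAnagrams (words : List String) (numWords : Int) : Int :=
  (PySem.List.pyRange 0 numWords).foldl (fun notAnagrams word =>
    (PySem.List.pyRange 0 numWords).foldl (fun acc otherWord =>
      if word ≠ otherWord then
        if PySem.List.pyGetD words word "" ≠ PySem.List.pyGetD words otherWord "" then acc + 1
        else acc
      else acc) notAnagrams) 0

-- ===== PORT B =====
def findNonAnagrams_alt (words : List String) (numWords : Int) : Int :=
  let prefixWords := PySem.List.slice words none (some (max numWords 0))
  let st := prefixWords.foldl
    (fun (p : PySem.Dict String Int × Int) w => (p.1.insert w (p.1.getD w 0 + 1), p.2 + 1))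
    (PySem.Dict.empty, 0)
  st.2 * (st.2 - 1) - ((st.1.values.map (fun c => c * (c - 1))).sum)

-- ===== PRECONDITION & SPEC =====
-- Pre_ excludes exactly the inputs where A raises IndexError: numWords larger than len(words).
def Pre_findNonAnagrams (words : List String) (numWords : Int) : Prop :=
  numWords ≤ (words.length : Int)
instance (words : List String) (numWords : Int) : Decidable (Pre_findNonAnagrams words numWords) := by unfold Pre_findNonAnagrams; infer_instance
def pvWitness_findNonAnagrams : List String × Int := (["ab", "ba", "ab", "c"], 4)

def Spec_findNonAnagrams (words : List String) (numWords : Int) (out : Int) : Prop := out = findNonAnagrams_alt words numWords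
instance (words : List String) (numWords : Int) (out : Int) : Decidable (Spec_findNonAnagrams words numWords out) := by unfold Spec_findNonAnagrams; infer_instance

-- ===== CLAIM (what is proved, stated in full; the proofs are below) =====
def Claim_equal_findNonAnagrams : Prop := ∀ (words : List String) (numWords : Int), Dom_findNonAnagrams words numWords → Pre_findNonAnagrams words numWords → Spec_findNonAnagrams words numWords (findNonAnagrams words numWords)

-- ===== LEMMAS AND PROOFS =====

-- B's single pass with pair state splits into the counter fold and a length count.
lemma pvFoldlPair (l : List String) (d : PySem.Dict String Int) (m : Int) :
    l.foldl (fun p w => (p.1.insert w (p.1.getD w 0 + 1), p.2 + 1)) (d, m)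
      = (l.foldl (fun d w => d.insert w (d.getD w 0 + 1)) d, m + l.length) := by
  induction l generalizing d m with
  | nil => simp
  | cons a l ih => simp [List.foldl_cons, ih]; ring

-- Summing count(k)·f(k) over the distinct elements equals summing f over the list itself.
lemma pvSumOverSet (ws : List String) (f : String → Int) :
    ((PySem.Set.ofList ws).map (fun k => (ws.count k : Int) * f k)).sum = (ws.map f).sum := by
  rw [Finset.sum_list_map_count ws f, ← List.sum_toFinset _ (PySem.Set.nodup_ofList ws)]
  have h : (PySem.Set.ofList ws).toFinset = ws.toFinset := by
    ext x; simp [PySem.Set.mem_ofList]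
  rw [h]
  refine Finset.sum_congr rfl (fun m _ => ?_)
  rw [nsmul_eq_mul]

lemma pvSumNeg (l : List String) (f : String → Int) :
    (l.map (fun x => -f x)).sum = -(l.map f).sum := by
  induction l with
  | nil => simp
  | cons a l ih => simp [ih]; ring

theorem findNonAnagrams_spec : Claim_equal_findNonAnagrams := by
  intro words numWords _ hpre
  unfold Pre_findNonAnagrams at hpre
  unfold Spec_findNonAnagrams findNonAnagrams findNonAnagrams_alt
  dsimp only
  by_cases h0 : 0 ≤ numWords
  · -- 0 ≤ numWords ≤ len words
    obtain ⟨n, hn⟩ : ∃ n : ℕ, (n : Int) = numWords := ⟨numWords.toNat, Int.toNat_of_nonneg h0⟩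
    subst hn
    have hmax : max (n : Int) 0 = (n : Int) := by omega
    rw [hmax, PySem.List.slice_to words (show (0:Int) ≤ (n:Int) by positivity), Int.toNat_natCast, pvFoldlPair,
      PySem.Dict.foldl_insert_getD_add_one_eq_counter]
    set ws : List String := words.take n with hws
    have hlen : ws.length = n := by rw [hws, List.length_take]; omega
    have hW : ∀ k : Int, 0 ≤ k → k < (n : Int) →
        PySem.List.pyGetD words k "" = PySem.List.pyGetD ws k "" := by
      intro k h1 h2
      rw [PySem.List.pyGetD_eq_getElem words "" h1 (by omega),
          PySem.List.pyGetD_eq_getElem ws "" h1 (by rw [hlen]; omega)]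
      exact (List.getElem_take (xs := words) (j := n)).symm
    -- A: rewrite the nested-if body as an accumulator + 0/1 indicator
    have hfun : ∀ i : Int, (fun (acc j : Int) =>
          if i ≠ j then
            (if PySem.List.pyGetD words i "" ≠ PySem.List.pyGetD words j "" then acc + 1 else acc)
          else acc)
        = (fun acc j => acc + (if i ≠ j ∧ PySem.List.pyGetD words i "" ≠ PySem.List.pyGetD words j "" then (1 : Int) else 0)) := by
      intro i; funext acc j
      by_cases h1 : i = j <;> by_cases h2 : PySem.List.pyGetD words i "" = PySem.List.pyGetD words j "" <;>
        simp [h1, h2]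
    simp only [hfun, PySem.List.foldl_add]
    -- each inner sum counts the j with ws[j] ≠ ws[i]
    have hS : ∀ i ∈ PySem.List.pyRange 0 (n : Int),
        ((PySem.List.pyRange 0 (n : Int)).map
          (fun j => if i ≠ j ∧ PySem.List.pyGetD words i "" ≠ PySem.List.pyGetD words j "" then (1 : Int) else 0)).sum
        = (n : Int) - (ws.count (PySem.List.pyGetD ws i "") : Int) := by
      intro i hi
      obtain ⟨hi0, hin⟩ := PySem.List.mem_pyRange_one.mp hi
      rw [List.map_congr_left (g := fun j =>
        if (!(PySem.List.pyGetD ws j "" == PySem.List.pyGetD ws i "")) = true then (1 : Int) else 0) ?_]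
      · rw [PySem.List.sum_map_ite_one_zero]
        have hmr := PySem.List.map_pyGetD_pyRange_zero' ws ""
        rw [hlen] at hmr
        have hcomp : (fun j => !(PySem.List.pyGetD ws j "" == PySem.List.pyGetD ws i ""))
            = (fun x => !(x == PySem.List.pyGetD ws i "")) ∘ (fun j => PySem.List.pyGetD ws j "") := rfl
        rw [hcomp, ← List.countP_map, hmr]
        have hnotc : ws.countP (fun x => !(x == PySem.List.pyGetD ws i ""))
            = ws.countP (fun a => decide ¬((a == PySem.List.pyGetD ws i "") = true)) := by
          refine List.countP_congr (fun a _ => ?_)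
          cases h : a == PySem.List.pyGetD ws i "" <;> simp_all
        have hsplit := List.length_eq_countP_add_countP
          (p := fun x => x == PySem.List.pyGetD ws i "") (l := ws)
        beta_reduce at hsplit
        have hcount : ws.count (PySem.List.pyGetD ws i "")
            = ws.countP (fun x => x == PySem.List.pyGetD ws i "") := List.count_eq_countP
        rw [hnotc, hcount]
        omega
      · intro j hj
        obtain ⟨hj0, hjn⟩ := PySem.List.mem_pyRange_one.mp hj
        rw [hW i hi0 hin, hW j hj0 hjn]
        by_cases hww : PySem.List.pyGetD ws j "" = PySem.List.pyGetD ws i ""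
        · rw [hww]; simp; exact hww
        · have hij : i ≠ j := fun h => hww (by rw [h])
          have h2 : PySem.List.pyGetD ws i "" ≠ PySem.List.pyGetD ws j "" := fun h => hww h.symm
          simp [hww, hij, h2]
    rw [List.map_congr_left hS]
    -- turn the outer map over indices into a map over ws itself
    have hmr := PySem.List.map_pyGetD_pyRange_zero' ws ""
    rw [hlen] at hmr
    have houter : (PySem.List.pyRange 0 (n : Int)).map
          (fun i => (n : Int) - (ws.count (PySem.List.pyGetD ws i "") : Int))
        = ws.map (fun x => (n : Int) - (ws.count x : Int)) := by
      have hcomp : (fun i => (n : Int) - (ws.count (PySem.List.pyGetD ws i "") : Int))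
          = (fun x => (n : Int) - (ws.count x : Int)) ∘ (fun j => PySem.List.pyGetD ws j "") := rfl
      rw [hcomp, ← List.map_map, hmr]
    rw [houter]
    -- A = n*n - Σ count
    have hA : (ws.map (fun x => (n : Int) - (ws.count x : Int))).sum
        = (n : Int) * n - (ws.map (fun x => (ws.count x : Int))).sum := by
      have h1 : (fun x : String => (n : Int) - (ws.count x : Int))
          = fun x => (n : Int) + (-((ws.count x : Int))) := by funext x; ring
      rw [h1, PySem.List.sum_map_add_int, PySem.List.sum_map_const_int, pvSumNeg, hlen]
      ring
    rw [hA]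
    -- B side: counter values
    have hval : (PySem.Dict.counter ws).values
        = (PySem.Set.ofList ws).map (fun k => (ws.count k : Int)) := by
      simp only [PySem.Dict.values, PySem.Dict.items_counter, List.map_map]; rfl
    rw [hval, List.map_map]
    have hB : ((PySem.Set.ofList ws).map
          ((fun c : Int => c * (c - 1)) ∘ (fun k => (ws.count k : Int)))).sum
        = (ws.map (fun x => (ws.count x : Int))).sum - (n : Int) := by
      have h1 : ((fun c : Int => c * (c - 1)) ∘ (fun k : String => (ws.count k : Int)))
          = fun k => (ws.count k : Int) * ((ws.count k : Int) - 1) := rfl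
      rw [h1, pvSumOverSet ws (fun k => (ws.count k : Int) - 1)]
      have h2 : (fun x : String => (ws.count x : Int) - 1)
          = fun x => (ws.count x : Int) + (-1) := by funext x; ring
      rw [h2, PySem.List.sum_map_add_int, PySem.List.sum_map_const_int, hlen]
      ring
    rw [hB, hlen]
    ring
  · -- numWords < 0 : both sides are 0
    have hr : PySem.List.pyRange 0 numWords = [] := by
      rw [PySem.List.pyRange_one]
      have h1 : (numWords - 0).toNat = 0 := by omega
      rw [h1]; simp
    have hm : max numWords 0 = 0 := by omega
    rw [hr, hm, PySem.List.slice_to words (show (0:Int) ≤ 0 by omega)]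
    simp [PySem.Dict.empty, PySem.Dict.values]
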